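-- pv_equiv track=rewrite | github.com/Sent1nelDNoir/lvl329_python | arrays_of_lists_of_sets.py | solve
-- ===== SOURCE A (Python) =====
-- def solve(arr):
--     arr = [set(x) for x in arr]
--     c = [arr.index(y) for y in arr]
--     res = []
--     for x in range(len(c)):
--         if c.count(x) >= 2:
--             res += [sum([ind for ind, y in enumerate(c) if y == x])]
--     return sorted(res)
-- ===== SOURCE B (Python) =====
-- def solve(arr):
--     # Group indices by frozenset key in one pass, tracking (count, index-sum) per group.
--     groups = {}
--     for i, x in enumerate(arr):
--         k = frozenset(x)
--         if k in groups:
--             cnt, sm = groups[k]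
--             groups[k] = (cnt + 1, sm + i)
--         else:
--             groups[k] = (1, i)
--     return sorted(sm for cnt, sm in groups.values() if cnt >= 2)
-- ===== Notes on version B (the rewrite author's own statement) =====
-- stated objective: alternative
-- what changed: Replaced the arr.index/count/enumerate rescans per index with a single pass over the list that groups by frozenset key in a dict, tracking each group's count and index-sum.
import Mathlib
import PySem

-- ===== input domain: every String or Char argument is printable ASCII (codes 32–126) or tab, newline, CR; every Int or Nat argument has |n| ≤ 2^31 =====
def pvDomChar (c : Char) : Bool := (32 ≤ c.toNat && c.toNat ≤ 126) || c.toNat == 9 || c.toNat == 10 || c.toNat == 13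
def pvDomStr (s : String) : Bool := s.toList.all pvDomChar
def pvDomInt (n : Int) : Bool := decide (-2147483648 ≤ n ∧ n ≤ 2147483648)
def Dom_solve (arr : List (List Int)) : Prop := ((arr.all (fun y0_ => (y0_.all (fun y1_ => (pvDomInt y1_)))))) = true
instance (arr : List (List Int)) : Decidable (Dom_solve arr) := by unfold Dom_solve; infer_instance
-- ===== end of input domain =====

-- B replaces A's per-index index/count/enumerate rescans by one grouping pass keyed by frozenset (alternative algorithm).


-- ===== PORT A =====
-- arr.index(y) on a list of sets: first index whose set == y (Python set equality).
-- Returns the length when absent (unreachable here: y is always drawn from the list itself,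
-- so Python's ValueError branch of list.index is never taken).
def findIdxEq : List (PySem.Set Int) → PySem.Set Int → Int
  | [], _ => 0
  | s :: rest, y => if PySem.Set.equal s y then 0 else 1 + findIdxEq rest y

def solve (arr : List (List Int)) : List Int :=
  let sets := arr.map (fun x => PySem.Set.ofList x)
  let c := sets.map (fun y => findIdxEq sets y)
  let res := (PySem.List.pyRange 0 (c.length) 1).foldl
    (fun res x =>
      if 2 ≤ PySem.List.count c x then
        res ++ [(((PySem.List.enumerate c).filter (fun p => p.2 == x)).map (fun p => p.1)).sum]
      else res) []
  PySem.List.sorted res (fun v => v) false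

-- ===== PORT B =====
-- dict keyed by frozenset: association list looked up / overwritten under set equality.
def lookupEq : List (PySem.Set Int × Int × Int) → PySem.Set Int → Option (Int × Int)
  | [], _ => none
  | (k, v) :: rest, s => if PySem.Set.equal k s then some v else lookupEq rest s

def updateEq : List (PySem.Set Int × Int × Int) → PySem.Set Int → Int × Int → List (PySem.Set Int × Int × Int)
  | [], k, v => [(k, v)]
  | (k', v') :: rest, k, v =>
      if PySem.Set.equal k' k then (k', v) :: rest else (k', v') :: updateEq rest k v

def solve_alt (arr : List (List Int)) : List Int :=
  let groups := (PySem.List.enumerate arr).foldl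
    (fun g p =>
      let k := PySem.Set.ofList p.2
      match lookupEq g k with
      | some (cnt, sm) => updateEq g k (cnt + 1, sm + p.1)
      | none => g ++ [(k, (1, p.1))]) []
  PySem.List.sorted (((groups.map (fun e => e.2)).filter (fun cs => 2 ≤ cs.1)).map (fun cs => cs.2))
    (fun v => v) false

-- ===== PRECONDITION & SPEC =====
def Spec_solve (arr : List (List Int)) (out : List Int) : Prop := out = solve_alt arr
instance (arr : List (List Int)) (out : List Int) : Decidable (Spec_solve arr out) := by unfold Spec_solve; infer_instance

-- ===== CLAIM (what is proved, stated in full; the proofs are below) =====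
def Claim_equal_solve : Prop := ∀ (arr : List (List Int)), Dom_solve arr → Spec_solve arr (solve arr)
-- ===== LEMMAS AND PROOFS =====

-- Python set equality (same members) is an equivalence relation.
theorem seq_refl (s : List Int) : PySem.Set.equal s s = true :=
  (PySem.Set.equal_iff s s).2 (fun _ => Iff.rfl)

theorem seq_symm {s t : List Int} (h : PySem.Set.equal s t = true) :
    PySem.Set.equal t s = true :=
  (PySem.Set.equal_iff t s).2 (fun x => ((PySem.Set.equal_iff s t).1 h x).symm)

theorem seq_trans {s t u : List Int} (h1 : PySem.Set.equal s t = true)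
    (h2 : PySem.Set.equal t u = true) : PySem.Set.equal s u = true :=
  (PySem.Set.equal_iff s u).2
    (fun x => ((PySem.Set.equal_iff s t).1 h1 x).trans ((PySem.Set.equal_iff t u).1 h2 x))

-- findIdxEq facts
theorem findIdxEq_nonneg (l : List (PySem.Set Int)) (y : PySem.Set Int) :
    0 ≤ findIdxEq l y := by
  induction l with
  | nil => simp [findIdxEq]
  | cons s rest ih => simp only [findIdxEq]; split <;> omega

theorem findIdxEq_append_of_mem (l r : List (PySem.Set Int)) (y : PySem.Set Int)
    (h : ∃ s ∈ l, PySem.Set.equal s y = true) :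
    findIdxEq (l ++ r) y = findIdxEq l y := by
  induction l with
  | nil => simp at h
  | cons s rest ih =>
      simp only [List.cons_append, findIdxEq]
      by_cases hs : PySem.Set.equal s y = true
      · rw [if_pos hs, if_pos hs]
      · rw [if_neg hs, if_neg hs]
        obtain ⟨z, hz, hze⟩ := h
        rcases List.mem_cons.1 hz with hz | hz
        · exact absurd (hz ▸ hze) hs
        · rw [ih ⟨z, hz, hze⟩]

theorem findIdxEq_append_of_not_found (l r : List (PySem.Set Int)) (y : PySem.Set Int)
    (h : ∀ s ∈ l, PySem.Set.equal s y = false) :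
    findIdxEq (l ++ r) y = (l.length : Int) + findIdxEq r y := by
  induction l with
  | nil => simp
  | cons s rest ih =>
      simp only [List.cons_append, findIdxEq]
      rw [if_neg (by simp [h s (by simp)])]
      rw [ih (fun z hz => h z (by simp [hz]))]
      simp; omega

theorem findIdxEq_congr (l : List (PySem.Set Int)) {y y' : PySem.Set Int}
    (h : PySem.Set.equal y y' = true) : findIdxEq l y = findIdxEq l y' := by
  induction l with
  | nil => rfl
  | cons s rest ih =>
      simp only [findIdxEq]
      have : PySem.Set.equal s y = PySem.Set.equal s y' := by
        by_cases hs : PySem.Set.equal s y = true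
        · rw [hs, (seq_trans hs h)]
        · by_cases hs' : PySem.Set.equal s y' = true
          · exact absurd (seq_trans hs' (seq_symm h)) hs
          · simp [Bool.eq_false_iff.2 hs, Bool.eq_false_iff.2 hs']
      rw [this, ih]

theorem findIdxEq_spec (l : List (PySem.Set Int)) (y : PySem.Set Int)
    (h : ∃ s ∈ l, PySem.Set.equal s y = true) :
    ∃ k : Nat, k < l.length ∧ findIdxEq l y = (k : Int) ∧
      PySem.Set.equal (l.getD k []) y = true ∧
      ∀ j < k, PySem.Set.equal (l.getD j []) y = false := by
  induction l with
  | nil => simp at h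
  | cons s rest ih =>
      by_cases hs : PySem.Set.equal s y = true
      · exact ⟨0, by simp, by simp [findIdxEq, hs], by simpa using hs, by omega⟩
      · obtain ⟨z, hz, hze⟩ := h
        rcases List.mem_cons.1 hz with hz | hz
        · exact absurd (hz ▸ hze) hs
        · obtain ⟨k, hk, heq, hkey, hmin⟩ := ih ⟨z, hz, hze⟩
          refine ⟨k + 1, by simpa using hk, ?_, by simpa using hkey, ?_⟩
          · simp [findIdxEq, hs, heq]; omega
          · intro j hj
            cases j with
            | zero => simpa using Bool.eq_false_iff.2 hs
            | succ j' => simpa using hmin j' (by omega)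

theorem findIdxEq_lt_of_mem (l : List (PySem.Set Int)) (y : PySem.Set Int)
    (h : ∃ s ∈ l, PySem.Set.equal s y = true) :
    findIdxEq l y < (l.length : Int) := by
  obtain ⟨k, hk, heq, _⟩ := findIdxEq_spec l y h
  omega

-- proof-side descriptions of both computations
def cOf (ks : List (List Int)) : List Int := ks.map (fun y => findIdxEq ks y)

def cntOf (ks : List (List Int)) (x : Nat) : Nat := PySem.List.count (cOf ks) (x : Int)

def smOf (ks : List (List Int)) (x : Nat) : Int :=
  (((PySem.List.enumerate (cOf ks)).filter (fun p => p.2 == (x : Int))).map (fun p => p.1)).sum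

def isFirst (ks : List (List Int)) (x : Nat) : Bool :=
  decide (findIdxEq ks (ks.getD x []) = (x : Int))

def firsts (ks : List (List Int)) : List Nat :=
  (List.range ks.length).filter (isFirst ks)

def specG (ks : List (List Int)) : List (List Int × Int × Int) :=
  (firsts ks).map (fun x => (ks.getD x [], ((cntOf ks x : Int), smOf ks x)))

theorem getD_mem_of_lt {ks : List (List Int)} {x : Nat} (hx : x < ks.length) :
    ks.getD x [] ∈ ks := by
  rw [List.getD_eq_getElem ks [] hx]; exact List.getElem_mem hx

theorem mem_cOf_bounds (ks : List (List Int)) :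
    ∀ v ∈ cOf ks, 0 ≤ v ∧ v < (ks.length : Int) := by
  intro v hv
  obtain ⟨y, hy, rfl⟩ := List.mem_map.1 hv
  exact ⟨findIdxEq_nonneg ks y, findIdxEq_lt_of_mem ks y ⟨y, hy, seq_refl y⟩⟩

theorem mem_firsts {ks : List (List Int)} {x : Nat} :
    x ∈ firsts ks ↔ x < ks.length ∧ findIdxEq ks (ks.getD x []) = (x : Int) := by
  simp [firsts, isFirst, List.mem_filter, List.mem_range]

theorem nodup_firsts (ks : List (List Int)) : (firsts ks).Nodup :=
  (List.nodup_range).filter _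

theorem first_of_cnt {ks : List (List Int)} {x : Nat} (h : 1 ≤ cntOf ks x) :
    x ∈ firsts ks := by
  have hmem : (x : Int) ∈ cOf ks := by
    have := h
    rw [cntOf, PySem.List.count_eq] at this
    exact List.count_pos_iff.1 (by omega)
  obtain ⟨y, hy, hyx⟩ := List.mem_map.1 hmem
  obtain ⟨k, hk, heq, hkey, _⟩ := findIdxEq_spec ks y ⟨y, hy, seq_refl y⟩
  have hkx : k = x := by omega
  subst hkx
  exact mem_firsts.2 ⟨hk, (findIdxEq_congr ks hkey).trans hyx⟩

-- cOf over an appended element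
theorem cOf_append (t : List (List Int)) (s : List Int) :
    cOf (t ++ [s]) = cOf t ++
      [if t.any (fun z => PySem.Set.equal z s) then findIdxEq t s else (t.length : Int)] := by
  unfold cOf
  rw [List.map_append]
  congr 1
  · exact List.map_congr_left (fun y hy =>
      findIdxEq_append_of_mem t [s] y ⟨y, hy, seq_refl y⟩)
  · simp only [List.map_cons, List.map_nil]
    by_cases h : t.any (fun z => PySem.Set.equal z s)
    · rw [if_pos h]
      obtain ⟨z, hz, hze⟩ := List.any_eq_true.1 h
      rw [findIdxEq_append_of_mem t [s] s ⟨z, hz, hze⟩]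
    · rw [if_neg h]
      have hall : ∀ z ∈ t, PySem.Set.equal z s = false := by
        intro z hz
        by_contra hc
        exact h (List.any_eq_true.2 ⟨z, hz, by simpa using hc⟩)
      rw [findIdxEq_append_of_not_found t [s] s hall]
      simp [findIdxEq, seq_refl]

theorem firsts_append (t : List (List Int)) (s : List Int) :
    firsts (t ++ [s]) =
      if t.any (fun z => PySem.Set.equal z s) then firsts t else firsts t ++ [t.length] := by
  have hgd : (t ++ [s]).getD t.length [] = s := by
    rw [List.getD_eq_getElem _ [] (by simp)]
    simp
  have hpart : (List.range t.length).filter (isFirst (t ++ [s])) = firsts t := by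
    rw [firsts]
    refine List.filter_congr ?_
    intro x hx
    have hx' : x < t.length := List.mem_range.1 hx
    unfold isFirst
    rw [List.getD_append _ _ _ _ hx',
      findIdxEq_append_of_mem t [s] _ ⟨t.getD x [], getD_mem_of_lt hx', seq_refl _⟩]
  unfold firsts
  simp only [List.length_append, List.length_cons, List.length_nil]
  rw [show t.length + (0 + 1) = t.length + 1 by omega, List.range_succ, List.filter_append, hpart]
  by_cases h : t.any (fun z => PySem.Set.equal z s)
  · rw [if_pos h]
    obtain ⟨z, hz, hze⟩ := List.any_eq_true.1 h
    have hlt : findIdxEq (t ++ [s]) ((t ++ [s]).getD t.length []) < (t.length : Int) := by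
      rw [hgd, findIdxEq_append_of_mem t [s] s ⟨z, hz, hze⟩]
      exact findIdxEq_lt_of_mem t s ⟨z, hz, hze⟩
    have : isFirst (t ++ [s]) t.length = false := by
      unfold isFirst
      simp only [decide_eq_false_iff_not]
      omega
    simp [this, firsts]
  · rw [if_neg h]
    have hall : ∀ z ∈ t, PySem.Set.equal z s = false := by
      intro z hz
      by_contra hc
      exact h (List.any_eq_true.2 ⟨z, hz, by simpa using hc⟩)
    have : isFirst (t ++ [s]) t.length = true := by
      unfold isFirst
      rw [hgd, findIdxEq_append_of_not_found t [s] s hall]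
      simp [findIdxEq, seq_refl]
    simp [this, firsts]

-- assoc-list lemmas for B's dict
theorem lookupEq_eq_none {g : List (PySem.Set Int × Int × Int)} {s : PySem.Set Int}
    (h : ∀ p ∈ g, PySem.Set.equal p.1 s = false) : lookupEq g s = none := by
  induction g with
  | nil => rfl
  | cons p rest ih =>
      obtain ⟨k, v⟩ := p
      simp only [lookupEq]
      rw [if_neg (by simp [h (k, v) (by simp)])]
      exact ih (fun q hq => h q (by simp [hq]))

theorem lookupEq_map_unique {L : List Nat} {kf : Nat → List Int} {v : Nat → Int × Int}
    {s : List Int} {x0 : Nat} (hx0 : x0 ∈ L)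
    (huniq : ∀ x ∈ L, (PySem.Set.equal (kf x) s = true ↔ x = x0)) :
    lookupEq (L.map (fun x => (kf x, v x))) s = some (v x0) := by
  induction L with
  | nil => simp at hx0
  | cons a rest ih =>
      simp only [List.map_cons, lookupEq]
      by_cases ha : PySem.Set.equal (kf a) s = true
      · rw [if_pos ha, (huniq a (by simp)).1 ha]
      · rw [if_neg ha]
        have hax : a ≠ x0 := fun he => ha ((huniq a (by simp)).2 he)
        rcases List.mem_cons.1 hx0 with h | h
        · exact absurd h.symm hax
        · exact ih h (fun x hx => huniq x (by simp [hx]))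

theorem updateEq_map_unique {L : List Nat} {kf : Nat → List Int} {v : Nat → Int × Int}
    {s : List Int} {x0 : Nat} (hnd : L.Nodup) (hx0 : x0 ∈ L)
    (huniq : ∀ x ∈ L, (PySem.Set.equal (kf x) s = true ↔ x = x0)) (w : Int × Int) :
    updateEq (L.map (fun x => (kf x, v x))) s w =
      L.map (fun x => (kf x, if x = x0 then w else v x)) := by
  induction L with
  | nil => simp at hx0
  | cons a rest ih =>
      simp only [List.map_cons, updateEq]
      rcases List.nodup_cons.1 hnd with ⟨hna, hndr⟩
      by_cases ha : PySem.Set.equal (kf a) s = true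
      · have hax : a = x0 := (huniq a (by simp)).1 ha
        rw [if_pos ha, if_pos hax]
        congr 1
        refine (List.map_congr_left ?_).symm
        intro x hx
        rw [if_neg (fun he : x = x0 => hna (by rw [show a = x from hax.trans he.symm]; exact hx))]
      · rw [if_neg ha]
        have hax : a ≠ x0 := fun he => ha ((huniq a (by simp)).2 he)
        rw [if_neg hax]
        rcases List.mem_cons.1 hx0 with h | h
        · exact absurd h.symm hax
        · rw [ih hndr h (fun x hx => huniq x (by simp [hx]))]

theorem cnt_snoc (c : List Int) (e : Int) (x : Nat) :
    PySem.List.count (c ++ [e]) (x : Int) =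
      PySem.List.count c (x : Int) + (if e = (x : Int) then 1 else 0) := by
  rw [PySem.List.count_eq, PySem.List.count_eq, List.count_append]
  congr 1
  by_cases he : e = (x : Int) <;> simp [he]

theorem sm_snoc (c : List Int) (e : Int) (x : Nat) :
    (((PySem.List.enumerate (c ++ [e]) 0).filter (fun p => p.2 == (x : Int))).map
        (fun p => p.1)).sum =
      (((PySem.List.enumerate c 0).filter (fun p => p.2 == (x : Int))).map
        (fun p => p.1)).sum + (if e = (x : Int) then (c.length : Int) else 0) := by
  rw [PySem.List.enumerate_append, PySem.List.enumerate_cons, PySem.List.enumerate_nil,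
    List.filter_append, List.map_append, List.sum_append]
  congr 1
  by_cases he : e = (x : Int) <;> simp [he]

theorem cnt_self_len (t : List (List Int)) : cntOf t t.length = 0 := by
  rw [cntOf, PySem.List.count_eq, List.count_eq_zero]
  intro hmem
  have := (mem_cOf_bounds t _ hmem).2
  omega

theorem sm_self_len (t : List (List Int)) : smOf t t.length = 0 := by
  rw [smOf]
  have : (PySem.List.enumerate (cOf t) 0).filter (fun p => p.2 == (t.length : Int)) = [] := by
    rw [List.filter_eq_nil_iff]
    intro p hp
    have hp2 : p.2 ∈ cOf t := by
      have := PySem.List.map_snd_enumerate (cOf t) 0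
      exact this ▸ List.mem_map_of_mem hp
    have := (mem_cOf_bounds t _ hp2).2
    simp only [beq_iff_eq]
    omega
  rw [this]
  simp

-- B's grouping fold computes specG
theorem groups_fold_eq (ks : List (List Int)) :
    (PySem.List.enumerate ks 0).foldl
      (fun g p => match lookupEq g p.2 with
        | some (cnt, sm) => updateEq g p.2 (cnt + 1, sm + p.1)
        | none => g ++ [(p.2, (1, p.1))]) [] = specG ks := by
  induction ks using List.reverseRecOn with
  | nil => simp [PySem.List.enumerate_nil, specG, firsts]
  | append_singleton t s ih =>
      rw [PySem.List.enumerate_append, List.foldl_append, ih,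
        PySem.List.enumerate_cons, PySem.List.enumerate_nil]
      simp only [List.foldl_cons, List.foldl_nil, zero_add]
      by_cases h : t.any (fun z => PySem.Set.equal z s)
      · obtain ⟨z, hz, hze⟩ := List.any_eq_true.1 h
        obtain ⟨k, hk, heq, hkey, hmin⟩ := findIdxEq_spec t s ⟨z, hz, hze⟩
        have hkF : k ∈ firsts t := mem_firsts.2 ⟨hk, (findIdxEq_congr t hkey).trans heq⟩
        have huniq : ∀ x ∈ firsts t, (PySem.Set.equal (t.getD x []) s = true ↔ x = k) := by
          intro x hxF
          constructor
          · intro hx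
            have h1 : findIdxEq t (t.getD x []) = findIdxEq t s := findIdxEq_congr t hx
            have h2 := (mem_firsts.1 hxF).2
            rw [h2, heq] at h1
            exact_mod_cast h1
          · rintro rfl; exact hkey
        rw [specG, lookupEq_map_unique hkF huniq]
        dsimp only
        rw [updateEq_map_unique (nodup_firsts t) hkF huniq
          ((cntOf t k : Int) + 1, smOf t k + (t.length : Int))]
        rw [specG, firsts_append, if_pos h]
        refine (List.map_congr_left ?_).symm
        intro x hxF
        have hxlt : x < t.length := (mem_firsts.1 hxF).1
        have hkey' : (t ++ [s]).getD x [] = t.getD x [] := List.getD_append _ _ _ _ hxlt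
        have hcnt : cntOf (t ++ [s]) x = cntOf t x + (if x = k then 1 else 0) := by
          rw [cntOf, cOf_append, if_pos h, heq, cnt_snoc, ← cntOf]
          congr 1
          by_cases hxk : x = k <;> simp [hxk]
          omega
        have hsm : smOf (t ++ [s]) x = smOf t x + (if x = k then (t.length : Int) else 0) := by
          rw [smOf, cOf_append, if_pos h, heq, sm_snoc, ← smOf]
          have hlen : (cOf t).length = t.length := by simp [cOf]
          rw [hlen]
          congr 1
          by_cases hxk : x = k <;> simp [hxk]
          omega
        rw [hkey', hcnt, hsm]
        by_cases hxk : x = k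
        · subst hxk; simp
        · simp [hxk]
      · have hall : ∀ z ∈ t, PySem.Set.equal z s = false := by
          intro z hz
          by_contra hc
          exact h (List.any_eq_true.2 ⟨z, hz, by simpa using hc⟩)
        have hnone : lookupEq (specG t) s = none := by
          apply lookupEq_eq_none
          intro p hp
          obtain ⟨x, hxF, rfl⟩ := List.mem_map.1 hp
          exact hall _ (getD_mem_of_lt (mem_firsts.1 hxF).1)
        rw [hnone]
        dsimp only
        unfold specG
        rw [firsts_append, if_neg h, List.map_append]
        congr 1
        · refine (List.map_congr_left ?_).symm
          intro x hxF
          have hxlt : x < t.length := (mem_firsts.1 hxF).1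
          have hkey' : (t ++ [s]).getD x [] = t.getD x [] := List.getD_append _ _ _ _ hxlt
          have hcnt : cntOf (t ++ [s]) x = cntOf t x := by
            rw [cntOf, cOf_append, if_neg h, cnt_snoc, ← cntOf]
            rw [if_neg (by omega : ¬((t.length : Int) = (x : Int)))]
            omega
          have hsm : smOf (t ++ [s]) x = smOf t x := by
            rw [smOf, cOf_append, if_neg h, sm_snoc, ← smOf]
            rw [if_neg (by omega : ¬((t.length : Int) = (x : Int)))]
            ring
          rw [hkey', hcnt, hsm]
        · have hgd : (t ++ [s]).getD t.length [] = s := by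
            rw [List.getD_eq_getElem _ [] (by simp)]
            simp
          have hcnt : cntOf (t ++ [s]) t.length = 1 := by
            rw [cntOf, cOf_append, if_neg h, cnt_snoc, ← cntOf, cnt_self_len, if_pos rfl]
          have hsm : smOf (t ++ [s]) t.length = (t.length : Int) := by
            rw [smOf, cOf_append, if_neg h, sm_snoc, ← smOf, sm_self_len, if_pos rfl]
            simp [cOf]
          simp [hcnt, hsm]

theorem enum_map {α β : Type} (f : α → β) (l : List α) (s : Int) :
    PySem.List.enumerate (l.map f) s = (PySem.List.enumerate l s).map (fun p => (p.1, f p.2)) := by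
  induction l generalizing s with
  | nil => simp [PySem.List.enumerate_nil]
  | cons a l ih => simp [PySem.List.enumerate_cons, ih]

-- Prop-conditioned variant of PySem.List.foldl_append_if
theorem foldl_append_ite {α β : Type} (p : α → Prop) [DecidablePred p] (f : α → β)
    (l : List α) (acc : List β) :
    l.foldl (fun acc x => if p x then acc ++ [f x] else acc) acc =
      acc ++ (l.filter (fun x => decide (p x))).map f := by
  rw [← PySem.List.foldl_append_if (fun x => decide (p x)) f l acc]
  congr 1
  funext acc x
  simp

theorem cntOf_def (ks : List (List Int)) (x : Nat) :
    cntOf ks x = PySem.List.count (cOf ks) (x : Int) := rfl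

def resOf (ks : List (List Int)) : List Int :=
  ((firsts ks).filter (fun (k : Nat) => decide (2 ≤ PySem.List.count (cOf ks) ((k : Nat) : Int)))).map
    (fun k => smOf ks k)

theorem range_filter_eq (ks : List (List Int)) :
    (List.range ks.length).filter (fun (k : Nat) => decide (2 ≤ PySem.List.count (cOf ks) ((k : Nat) : Int))) =
      (firsts ks).filter (fun (k : Nat) => decide (2 ≤ PySem.List.count (cOf ks) ((k : Nat) : Int))) := by
  rw [firsts, List.filter_filter]
  refine (List.filter_congr ?_).symm
  intro k hk
  by_cases h2 : 2 ≤ PySem.List.count (cOf ks) (k : Int)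
  · have hf : isFirst ks k = true := by
      have hm := first_of_cnt (ks := ks) (x := k) (by rw [cntOf_def]; omega)
      rw [firsts, List.mem_filter] at hm
      exact hm.2
    have h2'' : 2 ≤ List.count ((k : Nat) : Int) (cOf ks) := by
      rwa [PySem.List.count_eq] at h2
    simp [h2'', hf]
  · have h2' : ¬2 ≤ List.count ((k : Nat) : Int) (cOf ks) := by
      rwa [PySem.List.count_eq] at h2
    simp [h2']

theorem solveA_eq (arr : List (List Int)) :
    solve arr = PySem.List.sorted (resOf (arr.map (fun x => PySem.Set.ofList x)))
      (fun v => v) false := by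
  simp only [solve]
  rw [← cOf]
  rw [show (cOf (arr.map (fun x => PySem.Set.ofList x))).length = arr.length by
    simp [cOf]]
  rw [PySem.List.pyRange_zero_natCast]
  congr 1
  rw [foldl_append_ite
    (fun x => 2 ≤ PySem.List.count (cOf (arr.map (fun y => PySem.Set.ofList y))) x)]
  rw [List.filter_map, List.map_map, List.nil_append]
  simp only [Function.comp_def]
  rw [show arr.length = (arr.map (fun x => PySem.Set.ofList x)).length by simp]
  rw [range_filter_eq]
  rfl

theorem solveB_eq (arr : List (List Int)) :
    solve_alt arr = PySem.List.sorted (resOf (arr.map (fun x => PySem.Set.ofList x)))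
      (fun v => v) false := by
  simp only [solve_alt]
  have hB : (PySem.List.enumerate arr 0).foldl
      (fun g p =>
        match lookupEq g (PySem.Set.ofList p.2) with
        | some (cnt, sm) => updateEq g (PySem.Set.ofList p.2) (cnt + 1, sm + p.1)
        | none => g ++ [(PySem.Set.ofList p.2, (1, p.1))]) [] =
      specG (arr.map (fun x => PySem.Set.ofList x)) := by
    rw [← groups_fold_eq (arr.map (fun x => PySem.Set.ofList x)), enum_map, List.foldl_map]
  rw [hB]
  congr 1
  rw [specG, List.map_map, List.filter_map, List.map_map, resOf]
  simp only [Function.comp_def]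
  congr 1
  refine List.filter_congr ?_
  intro k _
  rw [cntOf_def, decide_eq_decide]
  omega

-- ===== VERDICT (by name: the statement is the Claim_ definition above) =====
theorem solve_spec : Claim_equal_solve := by
  intro arr _
  unfold Spec_solve
  rw [solveA_eq, solveB_eq]
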